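-- pv_equiv track=rewrite | github.com/FaresBadrCA/ProjectEuler | P51_99/P92_square_digit_chains.py | f
-- ===== SOURCE A (Python) =====
-- d = { (0,0): 1 }
--
-- def f(n,k):
--     """ Number of ways n can be written as a sum of k squares """
--     if (n,k) in d: return d[(n,k)]
--
--     if n < 0: return 0
--     if k == 0: return 0
--
--     s = 0
--     for j in range(10):
--         if k == 1 and j == 0: continue # The leftmost digit cannot be zero
--         s += f(n-j**2, k-1)
--
--     d[(n,k)] = s
--     return s
-- ===== SOURCE B (Python) =====
-- def f(n, k):
--     """ Number of ways n can be written as a sum of k squares (bottom-up DP). """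
--     if k < 0 or n < 0:
--         return 0
--     if k == 0:
--         return 1 if n == 0 else 0
--     if n > 81 * k:
--         return 0
--     # layer 1: the leftmost digit cannot be zero
--     row = [sum(1 for j in range(1, 10) if j * j == m) for m in range(n + 1)]
--     for _ in range(k - 1):
--         row = [sum(row[m - j * j] for j in range(10) if j * j <= m) for m in range(n + 1)]
--     return row[n]
-- ===== Notes on version B (the rewrite author's own statement) =====
-- stated objective: alternative
-- what changed: Replaces the top-down memoized recursion (with a mutable global dict) by an iterative bottom-up DP over rows indexed by the remaining sum, with an immediate 0 when n > 81*k; B drops A's global-dict side effect and uses no recursion.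
-- outside the precondition, e.g. on f(0, 6448): A returns 0, B returns 0
import Mathlib
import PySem

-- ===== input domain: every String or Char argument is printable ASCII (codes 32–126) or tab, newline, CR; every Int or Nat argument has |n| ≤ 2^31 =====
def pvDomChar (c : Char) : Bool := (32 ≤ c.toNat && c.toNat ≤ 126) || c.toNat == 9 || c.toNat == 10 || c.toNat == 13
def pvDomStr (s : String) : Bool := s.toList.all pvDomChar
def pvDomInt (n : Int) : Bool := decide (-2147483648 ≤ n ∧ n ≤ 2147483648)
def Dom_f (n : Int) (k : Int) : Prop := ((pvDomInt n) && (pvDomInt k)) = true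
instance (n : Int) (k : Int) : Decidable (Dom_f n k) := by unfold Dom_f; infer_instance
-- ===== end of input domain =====

-- B replaces A's top-down memoized recursion (global dict) by an iterative bottom-up DP over rows
-- indexed by the remaining sum, with an immediate 0 for n > 81*k; the equivalence is about the
-- RETURN value only (B drops A's global-memo side effect).

-- ===== PORT A =====
-- A's global memo dict is threaded through the recursion as explicit state (a hash map with the
-- same get?/insert semantics as Python's dict; every key is written at most once); the fuel argument
-- (k.toNat + 1) only makes the recursion total: it is never exhausted when 0 ≤ k.
def fGo : Nat → Int → Int → Std.HashMap (Int × Int) Int → Int × Std.HashMap (Int × Int) Int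
  | 0, _, _, d => (0, d)
  | fuel+1, n, k, d =>
    match d.get? (n, k) with
    | some v => (v, d)
    | none =>
      if n < 0 then (0, d)
      else if k = 0 then (0, d)
      else
        let acc := (PySem.List.pyRange 0 10 1).foldl
          (fun (acc : Int × Std.HashMap (Int × Int) Int) j =>
            if k = 1 ∧ j = 0 then acc
            else
              let r := fGo fuel (n - j * j) (k - 1) acc.2
              (acc.1 + r.1, r.2)) (0, d)
        (acc.1, acc.2.insert (n, k) acc.1)

def f (n : Int) (k : Int) : Int :=
  (fGo (k.toNat + 1) n k ((Std.HashMap.emptyWithCapacity).insert (0, 0) 1)).1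

-- ===== PORT B =====
-- one DP step: new[m] = sum(row[m - j*j] for j in range(10) if j*j <= m)
-- (indices are Nat; the guard j*j <= m makes Python's row[m - j*j] in range, so getD 0 is exact)
def fAltStep (row : List Int) (N : Nat) : List Int :=
  (List.range (N+1)).map (fun m =>
    ((List.range 10).filter (fun j => j*j ≤ m)).foldl (fun s j => s + row.getD (m - j*j) 0) 0)

def f_alt (n : Int) (k : Int) : Int :=
  if k < 0 ∨ n < 0 then 0
  else if k = 0 then (if n = 0 then 1 else 0)
  else if 81 * k < n then 0
  else
    (((List.range (k.toNat - 1)).foldl (fun r _ => fAltStep r n.toNat)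
        ((List.range (n.toNat+1)).map (fun m =>
          ((List.range' 1 9).filter (fun j => j*j = m)).foldl (fun s _ => s + (1:Int)) 0))).getD
      n.toNat 0)

-- ===== PRECONDITION & SPEC =====
-- Pre_ excludes the inputs on which A's depth-k recursion overflows the interpreter stack: for
-- k < 0 with 0 ≤ n the j=0 branch recurses forever on the same n (RecursionError always), and for
-- k > 996 the recursion is deeper than CPython's default recursion limit, so A raises
-- RecursionError in a default interpreter (with a raised limit A still returns 0); see the cite
-- in claim.json for one such excluded input.
def Pre_f (n : Int) (k : Int) : Prop := n < 0 ∨ (0 ≤ k ∧ k ≤ 996)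
instance (n : Int) (k : Int) : Decidable (Pre_f n k) := by unfold Pre_f; infer_instance
def pvWitness_f : Int × Int := (5, 2)
def Spec_f (n : Int) (k : Int) (out : Int) : Prop := out = f_alt n k
instance (n : Int) (k : Int) (out : Int) : Decidable (Spec_f n k out) := by unfold Spec_f; infer_instance

-- ===== CLAIM (what is proved, stated in full; the proofs are below) =====
def Claim_equal_f : Prop := ∀ (n : Int) (k : Int), Dom_f n k → Pre_f n k → Spec_f n k (f n k)

-- ===== LEMMAS AND PROOFS =====

-- the mathematical count: cnt n m = number of ways to write n as a sum of m digit squares,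
-- the first digit nonzero
def cnt : Int → Nat → Int
  | n, 0 => if n = 0 then 1 else 0
  | n, m+1 => if n < 0 then 0 else
      (if m = 0 then 0 else cnt n m) + cnt (n-1) m + cnt (n-4) m + cnt (n-9) m + cnt (n-16) m
      + cnt (n-25) m + cnt (n-36) m + cnt (n-49) m + cnt (n-64) m + cnt (n-81) m

theorem cnt_neg (n : Int) (m : Nat) (h : n < 0) : cnt n m = 0 := by
  cases m <;> simp [cnt, h] <;> omega

theorem cnt_big : ∀ (m : Nat) (n : Int), 81 * (m:Int) < n → cnt n m = 0 := by
  intro m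
  induction m with
  | zero => intro n h; simp at h; simp [cnt]; omega
  | succ m ih =>
    intro n h
    push_cast at h
    have hn : ¬ n < 0 := by nlinarith [Int.natCast_nonneg m]
    simp only [cnt, if_neg hn]
    rw [ih (n-1) (by omega), ih (n-4) (by omega), ih (n-9) (by omega), ih (n-16) (by omega),
        ih (n-25) (by omega), ih (n-36) (by omega), ih (n-49) (by omega), ih (n-64) (by omega),
        ih (n-81) (by omega)]
    split_ifs with h0
    · ring
    · rw [ih n (by omega)]; ring

theorem cnt_succ (n : Int) (L : Nat) (hn : ¬ n < 0) (hL : 1 ≤ L) :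
    cnt n (L+1) = cnt n L + cnt (n-1) L + cnt (n-4) L + cnt (n-9) L + cnt (n-16) L
      + cnt (n-25) L + cnt (n-36) L + cnt (n-49) L + cnt (n-64) L + cnt (n-81) L := by
  conv_lhs => rw [cnt]
  rw [if_neg hn, if_neg (by omega : ¬ L = 0)]

-- HashMap get?/insert facts in the orientation the proofs use
theorem hmGet_insert (d : Std.HashMap (Int × Int) Int) (a b : Int × Int) (v : Int) :
    (d.insert a v).get? b = if a = b then some v else d.get? b := by
  simp [Std.HashMap.getElem?_insert]

theorem hmGet_empty (a : Int × Int) :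
    (Std.HashMap.emptyWithCapacity (α := Int × Int) (β := Int)).get? a = none := by
  simp

def MemoInv (d : Std.HashMap (Int × Int) Int) : Prop :=
  d.get? (0, 0) = some 1 ∧
  ∀ p v, d.get? p = some v → 0 ≤ p.2 ∧ v = cnt p.1 p.2.toNat

theorem fGo_eq : ∀ (fuel : Nat) (n k : Int) (d : Std.HashMap (Int × Int) Int),
    0 ≤ k → k.toNat < fuel → MemoInv d →
    (fGo fuel n k d).1 = cnt n k.toNat ∧ MemoInv (fGo fuel n k d).2 := by
  intro fuel
  induction fuel with
  | zero => intro n k d _ hf _; omega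
  | succ fuel ih =>
    intro n k d hk hf hinv
    simp only [fGo]
    cases hget : d.get? (n, k) with
    | some v =>
      simp only
      exact ⟨(hinv.2 (n, k) v hget).2, hinv⟩
    | none =>
      simp only
      by_cases hn : n < 0
      · simp only [if_pos hn]
        exact ⟨(cnt_neg n k.toNat hn).symm, hinv⟩
      · simp only [if_neg hn]
        by_cases hk0 : k = 0
        · subst hk0
          have hne : n ≠ 0 := by
            intro h; subst h; rw [hinv.1] at hget; simp at hget
          simp only [if_pos rfl]
          constructor
          · simp [cnt, hne]
          · exact hinv
        · simp only [if_neg hk0]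
          have hk1 : 1 ≤ k := by omega
          have hfk : (k-1).toNat < fuel := by omega
          have hk1' : 0 ≤ k - 1 := by omega
          -- fold invariant over the 10-element loop
          have fold : ∀ (l : List Int) (s : Int) (d' : Std.HashMap (Int × Int) Int), MemoInv d' →
              (l.foldl
                (fun (acc : Int × Std.HashMap (Int × Int) Int) j =>
                  if k = 1 ∧ j = 0 then acc
                  else
                    let r := fGo fuel (n - j * j) (k - 1) acc.2
                    (acc.1 + r.1, r.2)) (s, d')).1
                = s + (l.map (fun j => if k = 1 ∧ j = 0 then 0
                                       else cnt (n - j * j) (k-1).toNat)).sum ∧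
              MemoInv (l.foldl
                (fun (acc : Int × Std.HashMap (Int × Int) Int) j =>
                  if k = 1 ∧ j = 0 then acc
                  else
                    let r := fGo fuel (n - j * j) (k - 1) acc.2
                    (acc.1 + r.1, r.2)) (s, d')).2 := by
            intro l
            induction l with
            | nil => intro s d' hd'; exact ⟨by simp, hd'⟩
            | cons j t iht =>
              intro s d' hd'
              by_cases hc : k = 1 ∧ j = 0
              · simp only [List.foldl_cons, List.map_cons, List.sum_cons, if_pos hc]
                have := iht s d' hd'
                constructor
                · rw [this.1]; ring
                · exact this.2
              · simp only [List.foldl_cons, List.map_cons, List.sum_cons, if_neg hc]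
                have hrec := ih (n - j * j) (k - 1) d' hk1' hfk hd'
                have := iht (s + (fGo fuel (n - j * j) (k - 1) d').1)
                  (fGo fuel (n - j * j) (k - 1) d').2 hrec.2
                constructor
                · rw [this.1, hrec.1]; ring
                · exact this.2
          have hrange : PySem.List.pyRange 0 10 1 = [0,1,2,3,4,5,6,7,8,9] := by decide
          rw [hrange]
          have hF := fold [0,1,2,3,4,5,6,7,8,9] 0 d hinv
          -- the accumulated sum is cnt n k.toNat
          have hm : k.toNat = (k-1).toNat + 1 := by omega
          have hsum : (0:Int) + ([0,1,2,3,4,5,6,7,8,9].map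
              (fun j : Int => if k = 1 ∧ j = 0 then 0
                              else cnt (n - j * j) (k-1).toNat)).sum = cnt n k.toNat := by
            rw [hm]
            have hk1iff : (k = 1) ↔ ((k-1).toNat = 0) := by omega
            simp only [List.map_cons, List.map_nil, List.sum_cons, List.sum_nil]
            by_cases h1 : k = 1
            · have hm'0 : (k-1).toNat = 0 := hk1iff.mp h1
              rw [hm'0]
              conv_rhs => rw [cnt]
              rw [if_neg hn, if_pos rfl]
              simp only [h1, true_and]
              norm_num
              ring
            · have h1' : ¬ ((k-1).toNat = 0) := fun h => h1 (hk1iff.mpr h)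
              obtain ⟨L, hL⟩ : ∃ L, (k-1).toNat = L + 1 := ⟨(k-1).toNat - 1, by omega⟩
              rw [hL, cnt_succ n (L+1) hn (by omega)]
              simp only [h1, false_and, if_false]
              push_cast
              ring_nf
          constructor
          · rw [hF.1]
            exact hsum
          · -- the inserted entry is correct
            refine ⟨?_, ?_⟩
            · rw [hmGet_insert]
              split_ifs with he
              · exfalso
                have h2 : k = (0:Int) := congrArg Prod.snd he
                exact hk0 h2
              · exact hF.2.1
            · intro p v hv
              rw [hmGet_insert] at hv
              split_ifs at hv with he
              · subst he
                injection hv with hv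
                subst hv
                refine ⟨hk, ?_⟩
                rw [hF.1]
                simpa using hsum
              · exact hF.2.2 p v hv

-- B-side: a fold over a filtered list is the sum of guarded terms
theorem foldl_filter_sum (l : List Nat) (p : Nat → Bool) (h : Nat → Int) :
    ∀ s0 : Int, (l.filter p).foldl (fun s j => s + h j) s0
      = s0 + (l.map (fun j => if p j then h j else 0)).sum := by
  induction l with
  | nil => intro s0; simp
  | cons j t iht =>
    intro s0
    by_cases hp : p j = true
    · rw [List.filter_cons_of_pos hp, List.foldl_cons, iht, List.map_cons, List.sum_cons,
        if_pos hp]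
      ring
    · rw [List.filter_cons_of_neg hp, iht, List.map_cons, List.sum_cons, if_neg hp]
      ring

theorem getD_map_range' (g : Nat → Int) (t m : Nat) (hm : m < t) :
    ((List.range t).map g).getD m 0 = g m := by
  rw [List.getD_eq_getElem?_getD, List.getElem?_map, List.getElem?_range hm]
  rfl

-- the first DP row is layer 1 of cnt
theorem row0_entry (m : Nat) :
    ((List.range' 1 9).filter (fun j => j*j = m)).foldl (fun s _ => s + (1:Int)) 0
      = cnt (m:Int) 1 := by
  have h9 : List.range' 1 9 = [1,2,3,4,5,6,7,8,9] := by decide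
  rw [h9, foldl_filter_sum [1,2,3,4,5,6,7,8,9] (fun j => j*j = m) (fun _ => (1:Int)) 0]
  have hm0 : ¬ ((m:Int) < 0) := by omega
  simp only [cnt, if_neg hm0, if_pos rfl, List.map_cons, List.map_nil, List.sum_cons,
    List.sum_nil, decide_eq_true_eq]
  have e1 : (if 1*1 = m then (1:Int) else 0) = (if (m:Int) - 1 = 0 then 1 else 0) := by
    split_ifs <;> omega
  have e2 : (if 2*2 = m then (1:Int) else 0) = (if (m:Int) - 4 = 0 then 1 else 0) := by
    split_ifs <;> omega
  have e3 : (if 3*3 = m then (1:Int) else 0) = (if (m:Int) - 9 = 0 then 1 else 0) := by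
    split_ifs <;> omega
  have e4 : (if 4*4 = m then (1:Int) else 0) = (if (m:Int) - 16 = 0 then 1 else 0) := by
    split_ifs <;> omega
  have e5 : (if 5*5 = m then (1:Int) else 0) = (if (m:Int) - 25 = 0 then 1 else 0) := by
    split_ifs <;> omega
  have e6 : (if 6*6 = m then (1:Int) else 0) = (if (m:Int) - 36 = 0 then 1 else 0) := by
    split_ifs <;> omega
  have e7 : (if 7*7 = m then (1:Int) else 0) = (if (m:Int) - 49 = 0 then 1 else 0) := by
    split_ifs <;> omega
  have e8 : (if 8*8 = m then (1:Int) else 0) = (if (m:Int) - 64 = 0 then 1 else 0) := by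
    split_ifs <;> omega
  have e9 : (if 9*9 = m then (1:Int) else 0) = (if (m:Int) - 81 = 0 then 1 else 0) := by
    split_ifs <;> omega
  rw [e1, e2, e3, e4, e5, e6, e7, e8, e9]
  rw [if_pos trivial]
  ring

-- one DP step advances the layer
theorem step_map (N : Nat) (L : Nat) (hL : 1 ≤ L) :
    fAltStep ((List.range (N+1)).map (fun (m : Nat) => cnt (m:Int) L)) N
      = (List.range (N+1)).map (fun (m : Nat) => cnt (m:Int) (L+1)) := by
  unfold fAltStep
  apply List.map_congr_left
  intro m hmem
  have hm : m < N + 1 := List.mem_range.mp hmem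
  have hm0 : ¬ ((m:Int) < 0) := by omega
  have h10 : List.range 10 = [0,1,2,3,4,5,6,7,8,9] := by decide
  rw [h10, foldl_filter_sum]
  have key : ∀ j : Nat, (if (decide (j*j ≤ m) : Bool) then
        ((List.range (N+1)).map (fun (m : Nat) => cnt (m:Int) L)).getD (m - j*j) 0 else 0)
      = cnt ((m:Int) - (j:Int)*(j:Int)) L := by
    intro j
    by_cases hj : j*j ≤ m
    · rw [if_pos (by simpa using hj)]
      rw [getD_map_range' (fun (m : Nat) => cnt (m:Int) L) (N+1) (m - j*j) (by omega)]
      congr 1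
      push_cast [Nat.cast_sub hj]
      ring
    · rw [if_neg (by simpa using hj)]
      rw [cnt_neg]
      have : (m:Int) < (j:Int)*(j:Int) := by exact_mod_cast Nat.lt_of_not_le hj
      linarith
  simp only [List.map_cons, List.map_nil, List.sum_cons, List.sum_nil]
  rw [key 0, key 1, key 2, key 3, key 4, key 5, key 6, key 7, key 8, key 9]
  rw [cnt_succ (m:Int) L hm0 hL]
  push_cast
  ring

theorem foldl_range_iterate {α : Type} (g : α → α) (t : Nat) (x : α) :
    (List.range t).foldl (fun r _ => g r) x = g^[t] x := by
  induction t with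
  | zero => simp
  | succ t ih =>
    rw [List.range_succ, List.foldl_append, ih]
    simp [Function.iterate_succ_apply']

theorem f_alt_eq_cnt (n k : Int) (hn : 0 ≤ n) (hk : 1 ≤ k) : f_alt n k = cnt n k.toNat := by
  unfold f_alt
  rw [if_neg (by omega)]
  rw [if_neg (by omega)]
  by_cases hbig : 81 * k < n
  · rw [if_pos hbig, cnt_big]
    push_cast; omega
  · rw [if_neg hbig]
    have hrows : ∀ t : Nat, (fun r => fAltStep r n.toNat)^[t]
        ((List.range (n.toNat+1)).map (fun m =>
          ((List.range' 1 9).filter (fun j => j*j = m)).foldl (fun s _ => s + (1:Int)) 0))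
        = (List.range (n.toNat+1)).map (fun (m : Nat) => cnt (m:Int) (1 + t)) := by
      intro t
      induction t with
      | zero =>
        simp only [Function.iterate_zero, id_eq, Nat.add_zero]
        exact List.map_congr_left (fun m _ => row0_entry m)
      | succ t iht =>
        rw [Function.iterate_succ_apply', iht]
        rw [step_map n.toNat (1 + t) (by omega)]
        have h11 : 1 + t + 1 = 1 + (t + 1) := by omega
        rw [h11]
    rw [foldl_range_iterate]
    rw [hrows (k.toNat - 1)]
    rw [getD_map_range' (fun (m : Nat) => cnt (m:Int) (1 + (k.toNat - 1))) (n.toNat+1) n.toNat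
      (by omega)]
    have h1 : 1 + (k.toNat - 1) = k.toNat := by omega
    have h2 : ((n.toNat : Int)) = n := Int.toNat_of_nonneg hn
    rw [h1, h2]

-- ===== VERDICT (by name: the statement is the Claim_ definition above) =====
theorem f_spec : Claim_equal_f := by
  intro n k _ hpre
  unfold Spec_f
  by_cases hn : n < 0
  · -- both sides are 0
    have hne : ((0:Int), (0:Int)) ≠ (n, k) := by
      intro h; injection h with h1 h2; omega
    unfold f
    simp only [fGo]
    rw [hmGet_insert, if_neg hne, hmGet_empty]
    simp only [if_pos hn]
    unfold f_alt
    rw [if_pos (Or.inr hn)]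
  · have hn' : 0 ≤ n := by omega
    have hk : 0 ≤ k := by
      rcases hpre with h | h
      · omega
      · exact h.1
    have hinv0 : MemoInv ((Std.HashMap.emptyWithCapacity).insert (0, 0) 1) := by
      constructor
      · rw [hmGet_insert, if_pos rfl]
      · intro p v hv
        rw [hmGet_insert] at hv
        split_ifs at hv with he
        · subst he
          injection hv with hv
          subst hv
          exact ⟨le_refl 0, by simp [cnt]⟩
        · rw [hmGet_empty] at hv
          simp at hv
    have hA := fGo_eq (k.toNat + 1) n k ((Std.HashMap.emptyWithCapacity).insert (0, 0) 1)
      hk (by omega) hinv0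
    unfold f
    rw [hA.1]
    by_cases hk0 : k = 0
    · subst hk0
      unfold f_alt
      rw [if_neg (by omega)]
      simp only [if_pos rfl]
      simp [cnt]
    · rw [f_alt_eq_cnt n k hn' (by omega)]
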